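-- pv_equiv track=rewrite | github.com/mutant-city/python_practice | google_challenge_2_2/solution.py | hasEndCycle
-- ===== SOURCE A (Python) =====
-- def hasEndCycle(value_list, window_size):
--     if window_size == 0: return 0
--     inc = 0
--     for j in range(0, len(value_list) - window_size):
--         for i in range(j,len(value_list) - window_size, window_size):
--             first_val = value_list[i:i+window_size]
--             second_val = value_list[i+window_size:i+(window_size*2)]
--             if first_val == second_val:
--                 inc += 1
--             else:
--                 inc = 0
--         if inc > 0:
--             inc += 1
--             return inc
--     return 0
-- ===== SOURCE B (Python) =====
-- def hasEndCycle(value_list, window_size):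
--     n = len(value_list)
--     w = window_size
--     if w <= 0 or n < 2 * w:
--         return 0
--     run = 0
--     for i in range(n - 2 * w, -1, -w):
--         if value_list[i:i + w] != value_list[i + w:i + 2 * w]:
--             break
--         run += 1
--     return run + 1 if run else 0
-- ===== Notes on version B (the rewrite author's own statement) =====
-- stated objective: faster
-- what changed: B drops A's quadratic double loop over all offsets and instead walks backwards from the end of the list in steps of window_size, counting consecutive equal adjacent windows until the first mismatch (the only windows A's answer can ever depend on), so it does O(n/w) slice comparisons of O(w) each instead of O(n^2) work.
import Mathlib
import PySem

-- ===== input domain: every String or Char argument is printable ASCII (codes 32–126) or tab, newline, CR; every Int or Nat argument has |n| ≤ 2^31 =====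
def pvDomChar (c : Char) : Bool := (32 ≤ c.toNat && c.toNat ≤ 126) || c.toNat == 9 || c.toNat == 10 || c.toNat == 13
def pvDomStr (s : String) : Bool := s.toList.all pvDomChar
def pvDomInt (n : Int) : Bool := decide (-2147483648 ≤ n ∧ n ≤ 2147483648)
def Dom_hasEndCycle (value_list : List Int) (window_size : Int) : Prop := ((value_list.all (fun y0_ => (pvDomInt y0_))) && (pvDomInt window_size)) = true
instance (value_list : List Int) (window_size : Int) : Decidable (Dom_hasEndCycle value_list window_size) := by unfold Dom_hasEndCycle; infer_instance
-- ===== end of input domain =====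

-- B replaces A's quadratic scan over every offset by a single backward walk over the
-- trailing adjacent-window comparisons (the only ones A's answer depends on): faster.

-- ===== PORT A =====
-- inner 'for i in range(j, len(value_list) - window_size, window_size)' loop, updating inc
def pvInnerFold (value_list : List Int) (window_size : Int) (inc : Int) (is : List Int) : Int :=
  is.foldl (fun inc i =>
    let first_val := PySem.List.slice value_list (some i) (some (i + window_size))
    let second_val := PySem.List.slice value_list (some (i + window_size)) (some (i + window_size * 2))
    if first_val = second_val then inc + 1 else 0) inc

-- outer 'for j' loop with the early 'return inc' when inc > 0, else 'return 0' at the end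
def pvOuterLoop (value_list : List Int) (window_size : Int) : List Int → Int → Int
  | [], _ => 0
  | j :: js, inc =>
      let inc' := pvInnerFold value_list window_size inc
        (PySem.List.pyRange j ((value_list.length : Int) - window_size) window_size)
      if inc' > 0 then inc' + 1 else pvOuterLoop value_list window_size js inc'

def hasEndCycle (value_list : List Int) (window_size : Int) : Int :=
  if window_size = 0 then 0
  else pvOuterLoop value_list window_size
    (PySem.List.pyRange 0 ((value_list.length : Int) - window_size) 1) 0

-- ===== PORT B =====
-- backward walk 'for i in range(n - 2*w, -1, -w)' with break, counting equal adjacent windows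
def pvWalkBack (value_list : List Int) (window_size : Int) : List Int → Int → Int
  | [], run => run
  | i :: is, run =>
      if PySem.List.slice value_list (some i) (some (i + window_size)) ≠
         PySem.List.slice value_list (some (i + window_size)) (some (i + 2 * window_size)) then run
      else pvWalkBack value_list window_size is (run + 1)

def hasEndCycle_alt (value_list : List Int) (window_size : Int) : Int :=
  let n : Int := value_list.length
  if window_size ≤ 0 ∨ n < 2 * window_size then 0
  else
    let run := pvWalkBack value_list window_size
      (PySem.List.pyRange (n - 2 * window_size) (-1) (-window_size)) 0
    if run ≠ 0 then run + 1 else 0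

-- ===== PRECONDITION & SPEC =====
def Spec_hasEndCycle (value_list : List Int) (window_size : Int) (out : Int) : Prop := out = hasEndCycle_alt value_list window_size
instance (value_list : List Int) (window_size : Int) (out : Int) : Decidable (Spec_hasEndCycle value_list window_size out) := by unfold Spec_hasEndCycle; infer_instance

-- ===== CLAIM (what is proved, stated in full; the proofs are below) =====
def Claim_equal_hasEndCycle : Prop := ∀ (value_list : List Int) (window_size : Int), Dom_hasEndCycle value_list window_size → Spec_hasEndCycle value_list window_size (hasEndCycle value_list window_size)

-- ===== LEMMAS AND PROOFS =====

-- the window comparison at offset i (both ports compare exactly these two slices)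
def pvB (v : List Int) (w i : Int) : Bool :=
  decide (PySem.List.slice v (some i) (some (i + w)) = PySem.List.slice v (some (i + w)) (some (i + w * 2)))

-- length of the longest prefix of consecutive 'true' comparisons
def pvC (v : List Int) (w : Int) : List Int → Int
  | [] => 0
  | i :: t => if pvB v w i then 1 + pvC v w t else 0

theorem pvC_nonneg (v : List Int) (w : Int) (l : List Int) : 0 ≤ pvC v w l := by
  induction l with
  | nil => simp [pvC]
  | cons i t ih => simp only [pvC]; split <;> omega

theorem pvWalkBack_eq (v : List Int) (w : Int) (l : List Int) (r : Int) :
    pvWalkBack v w l r = r + pvC v w l := by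
  induction l generalizing r with
  | nil => simp [pvWalkBack, pvC]
  | cons i t ih =>
      have h2 : i + 2 * w = i + w * 2 := by ring
      by_cases hb : pvB v w i = true
      · simp only [pvWalkBack, pvC, hb, if_true, h2]
        rw [if_neg (by simpa [pvB, h2] using hb), ih]
        ring
      · simp only [pvWalkBack, pvC, hb]
        rw [if_pos (by simpa [pvB, h2] using hb)]
        simp

theorem pvC_all (v : List Int) (w : Int) (l : List Int) (h : l.all (pvB v w)) :
    pvC v w l = l.length := by
  induction l with
  | nil => simp [pvC]
  | cons i t ih =>
      simp only [List.all_cons, Bool.and_eq_true] at h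
      simp [pvC, h.1, ih h.2]
      omega

theorem pvC_append (v : List Int) (w : Int) (l l' : List Int) :
    pvC v w (l ++ l') = if l.all (pvB v w) then pvC v w l + pvC v w l' else pvC v w l := by
  induction l with
  | nil => simp [pvC]
  | cons i t ih =>
      by_cases hb : pvB v w i = true
      · simp only [List.cons_append, pvC, hb, if_true, ih, List.all_cons, Bool.true_and]
        split <;> ring
      · simp [pvC, hb]

theorem pvInnerFold_eq (v : List Int) (w : Int) (l : List Int) (inc : Int) :
    pvInnerFold v w inc l = if l.all (pvB v w) then inc + l.length else pvC v w l.reverse := by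
  induction l generalizing inc with
  | nil => simp [pvInnerFold]
  | cons i t ih =>
      have hstep : ∀ a : Int, pvInnerFold v w a (i :: t) = pvInnerFold v w (if pvB v w i then a + 1 else 0) t := by
        intro a
        simp only [pvInnerFold, List.foldl_cons]
        congr 1
        by_cases hb : pvB v w i = true
        · rw [if_pos hb, if_pos (by simpa [pvB] using hb)]
        · rw [if_neg hb, if_neg (by simpa [pvB] using hb)]
      rw [hstep]
      by_cases hb : pvB v w i = true
      · rw [if_pos hb, ih]
        have hall : (i :: t).all (pvB v w) = t.all (pvB v w) := by simp [hb]
        rw [hall]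
        by_cases ht : t.all (pvB v w) = true
        · rw [if_pos ht, if_pos ht]
          simp only [List.length_cons]
          push_cast; ring
        · rw [if_neg ht, if_neg ht, List.reverse_cons, pvC_append,
            if_neg (by simpa using ht)]
      · rw [if_neg hb, ih]
        have hall : (i :: t).all (pvB v w) = false := by simp [hb]
        rw [hall, List.reverse_cons, pvC_append]
        simp only [Bool.false_eq_true, if_false]
        by_cases ht : t.all (pvB v w) = true
        · rw [if_pos ht, if_pos (by simpa using ht),
            pvC_all v w _ (by simpa using ht)]
          simp [pvC, hb]
        · rw [if_neg ht, if_neg (by simpa using ht)]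

theorem pvInnerFold_zero (v : List Int) (w : Int) (l : List Int) :
    pvInnerFold v w 0 l = pvC v w l.reverse := by
  rw [pvInnerFold_eq]
  by_cases h : l.all (pvB v w) = true
  · rw [if_pos h, pvC_all v w _ (by simpa using h)]
    simp
  · rw [if_neg h]

-- comparisons strictly past n - 2w are between slices of different lengths, hence false
theorem pvB_mid_false (v : List Int) (w i : Int) (hw : 0 < w) (hi0 : 0 ≤ i)
    (hlo : (v.length : Int) - 2 * w < i) (hhi : i < (v.length : Int) - w) :
    pvB v w i = false := by
  apply decide_eq_false
  intro h
  have hl := congrArg List.length h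
  rw [PySem.List.length_slice, PySem.List.length_slice] at hl
  simp only [PySem.List.clampIdx] at hl
  split_ifs at hl <;> omega

-- the inner chain at offset j ends with a false comparison, so inc is reset to 0
theorem pvInnerFold_zero_of_bad (v : List Int) (w j inc : Int) (hw : 0 < w) (hj0 : 0 ≤ j)
    (hjm : j < (v.length : Int) - w)
    (hdvd : w ∣ ((v.length : Int) - w) - j → pvB v w ((v.length : Int) - 2 * w) = false) :
    pvInnerFold v w inc (PySem.List.pyRange j ((v.length : Int) - w) w) = 0 := by
  rw [PySem.List.pyRange_of_pos _ _ hw, if_pos hjm]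
  set n : Int := (v.length : Int) with hn
  set c : Int := ((n - w) - j + w - 1) / w with hc
  have hr0 : 0 ≤ ((n - w) - j + w - 1) % w := Int.emod_nonneg _ (by omega)
  have hr1 : ((n - w) - j + w - 1) % w < w := Int.emod_lt_of_pos _ hw
  have hde : w * c + ((n - w) - j + w - 1) % w = (n - w) - j + w - 1 := Int.ediv_add_emod _ _
  have hc1 : 1 ≤ c := by
    by_cases hcl : 1 ≤ c
    · exact hcl
    · have hcle : c ≤ 0 := by omega
      have : w * c ≤ 0 := mul_nonpos_of_nonneg_of_nonpos (by omega) hcle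
      omega
  have hct : c.toNat = (c - 1).toNat + 1 := by omega
  rw [hct, List.range_succ, List.map_append, pvInnerFold, List.foldl_append]
  simp only [List.map_cons, List.map_nil, List.foldl_cons, List.foldl_nil]
  set L : Int := j + w * ((c - 1).toNat : Int) with hL
  have hLe : L = (n - w) - 1 - (((n - w) - j + w - 1) % w) := by
    have h1 : ((c - 1).toNat : Int) = c - 1 := by omega
    rw [hL, h1]
    have h2 : w * (c - 1) = w * c - w := by ring
    omega
  have hBL : pvB v w L = false := by
    by_cases hd : L = n - 2 * w
    · rw [hd]
      apply hdvd
      refine ⟨c, ?_⟩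
      have h2 : w * (c - 1) = w * c - w := by ring
      omega
    · exact pvB_mid_false v w L hw
        (by
          have : 0 ≤ w * ((c - 1).toNat : Int) := mul_nonneg (by omega) (by omega)
          omega)
        (by omega) (by omega)
  rw [if_neg (by simpa [pvB] using hBL)]

-- if every inner pass yields 0, the outer loop falls through and returns 0
theorem pvOuterLoop_zero (v : List Int) (w : Int) (js : List Int)
    (h : ∀ j ∈ js, pvInnerFold v w 0 (PySem.List.pyRange j ((v.length : Int) - w) w) = 0) :
    pvOuterLoop v w js 0 = 0 := by
  induction js with
  | nil => rfl
  | cons j js ih =>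
      have hz := h j (by simp)
      simp only [pvOuterLoop, hz]
      rw [if_neg (by omega)]
      exact ih (fun j' hj' => h j' (by simp [hj']))

theorem pvOuterLoop_cons (v : List Int) (w j : Int) (js : List Int) (inc : Int) :
    pvOuterLoop v w (j :: js) inc
      = (if pvInnerFold v w inc (PySem.List.pyRange j ((v.length : Int) - w) w) > 0
         then pvInnerFold v w inc (PySem.List.pyRange j ((v.length : Int) - w) w) + 1
         else pvOuterLoop v w js (pvInnerFold v w inc (PySem.List.pyRange j ((v.length : Int) - w) w))) := rfl

-- A's chain at offset (n-w) % w, reversed, is exactly B's backward range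
theorem pvRange_reverse (v : List Int) (w : Int) (hw : 0 < w)
    (hm : w ≤ (v.length : Int) - w) :
    (PySem.List.pyRange (((v.length : Int) - w) % w) ((v.length : Int) - w) w).reverse
      = PySem.List.pyRange ((v.length : Int) - 2 * w) (-1) (-w) := by
  set n : Int := (v.length : Int) with hn
  set m : Int := n - w with hmd
  have hj0 : 0 ≤ m % w := Int.emod_nonneg _ (by omega)
  have hjw : m % w < w := Int.emod_lt_of_pos _ hw
  have hde : w * (m / w) + m % w = m := Int.ediv_add_emod _ _
  have hq1 : 1 ≤ m / w := by
    by_cases h : 1 ≤ m / w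
    · exact h
    · have h0 : m / w ≤ 0 := by omega
      have : w * (m / w) ≤ 0 := mul_nonpos_of_nonneg_of_nonpos (by omega) h0
      omega
  have hcount : (m - m % w + w - 1) / w = m / w := by
    have h1 : m - m % w + w - 1 = w - 1 + w * (m / w) := by omega
    rw [h1, Int.add_mul_ediv_left _ _ (by omega : w ≠ 0),
      Int.ediv_eq_zero_of_lt (by omega) (by omega), zero_add]
  rw [PySem.List.pyRange_of_pos _ _ hw, if_pos (by omega), hcount]
  have hrhs : PySem.List.pyRange (n - 2 * w) (-1) (-w)
      = List.map (fun k : Nat => (n - 2 * w) + (-w) * (k : Int)) (List.range (m / w).toNat) := by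
    simp only [PySem.List.pyRange]
    rw [if_neg (by omega : ¬ -w = 0)]
    rw [if_neg (by omega : ¬ (0:Int) < -w), if_pos (by omega : (-1:Int) < n - 2 * w)]
    have h2 : (n - 2 * w - -1 + - -w - 1) / -(-w) = m / w := by
      have h3 : n - 2 * w - -1 + - -w - 1 = m := by omega
      rw [h3]; ring_nf
    rw [h2]
  rw [hrhs]
  apply List.ext_getElem
  · simp
  · intro k hk1 hk2
    simp only [List.getElem_reverse, List.getElem_map, List.getElem_range,
      List.length_map, List.length_range]
    simp only [List.length_reverse, List.length_map, List.length_range] at hk1 hk2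
    have hc1 : ((m / w).toNat - 1 - k : Nat) = ((m / w) - 1 - (k : Int) : Int) := by omega
    rw [hc1]
    have h4 : w * (m / w - 1 - (k : Int)) = w * (m / w) - w - w * (k : Int) := by ring
    have h5 : -w * (k : Int) = -(w * (k : Int)) := by ring
    omega

-- B's backward range starts with n - 2w
theorem pvR_cons (v : List Int) (w : Int) (hw : 0 < w)
    (hm : w ≤ (v.length : Int) - w) :
    ∃ t, PySem.List.pyRange ((v.length : Int) - 2 * w) (-1) (-w)
      = ((v.length : Int) - 2 * w) :: t := by
  set n : Int := (v.length : Int) with hn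
  set m : Int := n - w with hmd
  have hj0 : 0 ≤ m % w := Int.emod_nonneg _ (by omega)
  have hjw : m % w < w := Int.emod_lt_of_pos _ hw
  have hde : w * (m / w) + m % w = m := Int.ediv_add_emod _ _
  have hq1 : 1 ≤ m / w := by
    by_cases h : 1 ≤ m / w
    · exact h
    · have h0 : m / w ≤ 0 := by omega
      have : w * (m / w) ≤ 0 := mul_nonpos_of_nonneg_of_nonpos (by omega) h0
      omega
  simp only [PySem.List.pyRange]
  rw [if_neg (by omega : ¬ -w = 0)]
  rw [if_neg (by omega : ¬ (0:Int) < -w), if_pos (by omega : (-1:Int) < n - 2 * w)]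
  have h2 : ((n - 2 * w - -1 + - -w - 1) / -(-w)).toNat = (m / w - 1).toNat + 1 := by
    have h3 : n - 2 * w - -1 + - -w - 1 = m := by omega
    rw [h3]
    have h4 : m / -(-w) = m / w := by ring_nf
    rw [h4]; omega
  rw [h2, List.range_succ_eq_map, List.map_cons]
  refine ⟨List.map (fun k : Nat => n - 2 * w + -w * (k : Int)) (List.map Nat.succ (List.range (m / w - 1).toNat)), ?_⟩
  norm_num

-- B unfolded through pvC
theorem pvAlt_eq (v : List Int) (w : Int) :
    hasEndCycle_alt v w
      = (if w ≤ 0 ∨ (v.length : Int) < 2 * w then 0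
         else if pvC v w (PySem.List.pyRange ((v.length : Int) - 2 * w) (-1) (-w)) ≠ 0
              then pvC v w (PySem.List.pyRange ((v.length : Int) - 2 * w) (-1) (-w)) + 1 else 0) := by
  show (if w ≤ 0 ∨ (v.length : Int) < 2 * w then (0:Int)
        else if pvWalkBack v w (PySem.List.pyRange ((v.length : Int) - 2 * w) (-1) (-w)) 0 ≠ 0
             then pvWalkBack v w (PySem.List.pyRange ((v.length : Int) - 2 * w) (-1) (-w)) 0 + 1 else 0) = _
  rw [pvWalkBack_eq, zero_add]

-- the outer loop, started anywhere at or before offset (n-w) % w, computes B's answer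
theorem pvSkip (v : List Int) (w : Int) (hw : 0 < w) (hm : w ≤ (v.length : Int) - w) :
    ∀ (d : Nat) (j : Int), 0 ≤ j → j ≤ ((v.length : Int) - w) % w →
      ((((v.length : Int) - w) % w) - j).toNat = d →
      pvOuterLoop v w (PySem.List.pyRange j ((v.length : Int) - w) 1) 0
        = (if pvC v w (PySem.List.pyRange ((v.length : Int) - 2 * w) (-1) (-w)) ≠ 0
           then pvC v w (PySem.List.pyRange ((v.length : Int) - 2 * w) (-1) (-w)) + 1 else 0) := by
  have hj0 : 0 ≤ ((v.length : Int) - w) % w := Int.emod_nonneg _ (by omega)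
  have hjw : ((v.length : Int) - w) % w < w := Int.emod_lt_of_pos _ hw
  have hde : w * (((v.length : Int) - w) / w) + ((v.length : Int) - w) % w = (v.length : Int) - w :=
    Int.ediv_add_emod _ _
  intro d
  induction d with
  | zero =>
      intro j hj0' hjle hjd
      have hj : j = ((v.length : Int) - w) % w := by omega
      subst hj
      rw [PySem.List.pyRange_one_cons (by omega : ((v.length : Int) - w) % w < (v.length : Int) - w)]
      rw [pvOuterLoop_cons]
      have hinc : pvInnerFold v w 0
          (PySem.List.pyRange (((v.length : Int) - w) % w) ((v.length : Int) - w) w)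
          = pvC v w (PySem.List.pyRange ((v.length : Int) - 2 * w) (-1) (-w)) := by
        rw [pvInnerFold_zero, pvRange_reverse v w hw hm]
      rw [hinc]
      by_cases hcz : pvC v w (PySem.List.pyRange ((v.length : Int) - 2 * w) (-1) (-w)) = 0
      · rw [hcz, if_neg (by omega : ¬ (0:Int) > 0), if_neg (by simp)]
        obtain ⟨t, ht⟩ := pvR_cons v w hw hm
        have hBfalse : pvB v w ((v.length : Int) - 2 * w) = false := by
          by_cases hb : pvB v w ((v.length : Int) - 2 * w) = true
          · exfalso
            rw [ht] at hcz
            simp only [pvC, hb, if_true] at hcz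
            have := pvC_nonneg v w t
            omega
          · simpa using hb
        apply pvOuterLoop_zero
        intro j' hj'
        have hmem := (PySem.List.mem_pyRange_one).1 hj'
        exact pvInnerFold_zero_of_bad v w j' 0 hw (by omega) (by omega) (fun _ => hBfalse)
      · have hpos : 0 < pvC v w (PySem.List.pyRange ((v.length : Int) - 2 * w) (-1) (-w)) :=
          lt_of_le_of_ne (pvC_nonneg _ _ _) (Ne.symm hcz)
        rw [if_pos hpos, if_pos hcz]
  | succ e ih =>
      intro j hj0' hjle hjd
      have hjlt : j < ((v.length : Int) - w) % w := by omega
      rw [PySem.List.pyRange_one_cons (by omega : j < (v.length : Int) - w)]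
      rw [pvOuterLoop_cons]
      have hz : pvInnerFold v w 0 (PySem.List.pyRange j ((v.length : Int) - w) w) = 0 := by
        apply pvInnerFold_zero_of_bad v w j 0 hw hj0' (by omega)
        intro hd
        exfalso
        obtain ⟨k, hk⟩ := hd
        have hsub : (((v.length : Int) - w) % w) - j = w * (k - ((v.length : Int) - w) / w) := by
          rw [mul_sub]
          omega
        have hposd : 0 < (((v.length : Int) - w) % w) - j := by omega
        have := Int.le_of_dvd hposd ⟨k - ((v.length : Int) - w) / w, hsub⟩
        omega
      rw [hz, if_neg (by omega : ¬ (0:Int) > 0)]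
      exact ih (j + 1) (by omega) (by omega) (by omega)

-- ===== VERDICT (by name: the statement is the Claim_ definition above) =====
theorem hasEndCycle_spec : Claim_equal_hasEndCycle := by
  intro v w _
  unfold Spec_hasEndCycle
  rw [pvAlt_eq]
  by_cases h0 : w = 0
  · subst h0
    rw [hasEndCycle, if_pos rfl, if_pos (Or.inl le_rfl)]
  by_cases hneg : w < 0
  · rw [hasEndCycle, if_neg h0, if_pos (Or.inl (le_of_lt hneg))]
    apply pvOuterLoop_zero
    intro j hj
    have hmem := (PySem.List.mem_pyRange_one).1 hj
    have hempty : PySem.List.pyRange j ((v.length : Int) - w) w = [] := by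
      simp only [PySem.List.pyRange]
      rw [if_neg h0, if_neg (by omega : ¬ (0:Int) < w), if_neg (by omega : ¬ (v.length : Int) - w < j)]
      simp
    rw [hempty]
    rfl
  have hw : 0 < w := by omega
  by_cases hsmall : (v.length : Int) - w < w
  · rw [hasEndCycle, if_neg h0, if_pos (Or.inr (by omega))]
    apply pvOuterLoop_zero
    intro j hj
    have hmem := (PySem.List.mem_pyRange_one).1 hj
    apply pvInnerFold_zero_of_bad v w j 0 hw (by omega) (by omega)
    intro hd
    exfalso
    have := Int.le_of_dvd (by omega : 0 < ((v.length : Int) - w) - j) hd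
    omega
  · rw [hasEndCycle, if_neg h0, if_neg (by omega)]
    exact pvSkip v w hw (by omega) ((((v.length : Int) - w) % w) - 0).toNat 0 le_rfl
      (Int.emod_nonneg _ (by omega)) rfl
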